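-- pv_equiv track=rewrite | github.com/da380/pyslfp | pyslfp/utils.py | get_spherical_harmonic_degree_blocks
-- ===== SOURCE A (Python) =====
-- def get_spherical_harmonic_degree_blocks(
--     lmax_obs: int, min_degree: int = 0
-- ) -> list[list[int]]:
--     """
--     Generates index blocks grouping spherical harmonic coefficients by degree l.
--     Assumes standard ordering where degree l coefficients start at index l^2.
--     """
--     blocks = []
--     for l in range(min_degree, lmax_obs + 1):
--         start_idx = l**2 - min_degree**2
--         end_idx = (l + 1) ** 2 - min_degree**2
--         blocks.append(list(range(start_idx, end_idx)))
--     return blocks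
-- ===== SOURCE B (Python) =====
-- def get_spherical_harmonic_degree_blocks(lmax_obs: int, min_degree: int = 0) -> list[list[int]]:
--     """
--     Same blocks, built with a running cursor: each degree l contributes a
--     block of 2*l + 1 consecutive indices beginning where the previous block
--     ended, so no per-degree squaring is needed.
--     """
--     blocks = []
--     cursor = 0
--     l = min_degree
--     while l <= lmax_obs:
--         width = 2 * l + 1
--         blocks.append(list(range(cursor, cursor + width)))
--         cursor += width
--         l += 1
--     return blocks
-- ===== Notes on version B (the rewrite author's own statement) =====
-- stated objective: alternative
-- what changed: Replaces the per-degree closed-form index arithmetic (l**2 - min_degree**2 bounds recomputed each iteration) with a while loop maintaining a running cursor: each degree contributes 2l+1 consecutive indices starting where the previous block ended.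
import Mathlib
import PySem

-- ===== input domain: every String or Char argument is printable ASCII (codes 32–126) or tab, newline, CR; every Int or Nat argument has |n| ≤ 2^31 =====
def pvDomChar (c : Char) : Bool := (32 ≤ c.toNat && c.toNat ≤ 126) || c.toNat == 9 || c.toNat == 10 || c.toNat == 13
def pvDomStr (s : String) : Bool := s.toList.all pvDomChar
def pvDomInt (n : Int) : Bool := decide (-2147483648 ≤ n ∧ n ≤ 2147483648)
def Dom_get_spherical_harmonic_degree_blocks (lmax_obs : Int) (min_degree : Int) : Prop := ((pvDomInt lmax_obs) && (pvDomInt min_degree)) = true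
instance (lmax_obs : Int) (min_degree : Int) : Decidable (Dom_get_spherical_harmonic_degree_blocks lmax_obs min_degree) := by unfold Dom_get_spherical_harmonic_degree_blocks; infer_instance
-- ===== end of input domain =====

-- B builds the same per-degree blocks with a running cursor (each block is 2l+1
-- consecutive indices starting where the previous block ended) instead of A's
-- closed-form l^2 - min_degree^2 arithmetic; alternative decomposition, same cost.

-- ===== PORT A =====
-- for l in range(min_degree, lmax_obs + 1): blocks.append(list(range(l**2 - m**2, (l+1)**2 - m**2)))
def get_spherical_harmonic_degree_blocks (lmax_obs : Int) (min_degree : Int) : List (List Int) :=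
  (PySem.List.pyRange min_degree (lmax_obs + 1) 1).foldl
    (fun blocks l =>
      blocks ++ [PySem.List.pyRange (l ^ 2 - min_degree ^ 2) ((l + 1) ^ 2 - min_degree ^ 2) 1])
    []

-- ===== PORT B =====
-- the while loop of Source B: state (l, cursor, blocks), stops when l > lmax_obs
def pvBLoop (lmax_obs : Int) (l : Int) (cursor : Int) (blocks : List (List Int)) : List (List Int) :=
  if l ≤ lmax_obs then
    pvBLoop lmax_obs (l + 1) (cursor + (2 * l + 1))
      (blocks ++ [PySem.List.pyRange cursor (cursor + (2 * l + 1)) 1])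
  else blocks
termination_by (lmax_obs + 1 - l).toNat
decreasing_by omega

def get_spherical_harmonic_degree_blocks_alt (lmax_obs : Int) (min_degree : Int) : List (List Int) :=
  pvBLoop lmax_obs min_degree 0 []

-- ===== PRECONDITION & SPEC =====
def Spec_get_spherical_harmonic_degree_blocks (lmax_obs : Int) (min_degree : Int) (out : List (List Int)) : Prop := out = get_spherical_harmonic_degree_blocks_alt lmax_obs min_degree
instance (lmax_obs : Int) (min_degree : Int) (out : List (List Int)) : Decidable (Spec_get_spherical_harmonic_degree_blocks lmax_obs min_degree out) := by unfold Spec_get_spherical_harmonic_degree_blocks; infer_instance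

-- ===== CLAIM (what is proved, stated in full; the proofs are below) =====
def Claim_equal_get_spherical_harmonic_degree_blocks : Prop := ∀ (lmax_obs : Int) (min_degree : Int), Dom_get_spherical_harmonic_degree_blocks lmax_obs min_degree → Spec_get_spherical_harmonic_degree_blocks lmax_obs min_degree (get_spherical_harmonic_degree_blocks lmax_obs min_degree)

-- ===== LEMMAS AND PROOFS =====

-- Cursor invariant: if cursor = l^2 - m^2, B's loop from l produces exactly
-- A's fold over range(l, lmax+1) appended to the accumulated blocks.
theorem pvBLoop_eq (lmax_obs m : Int) : ∀ (n : Nat) (l cursor : Int) (blocks : List (List Int)),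
    (lmax_obs + 1 - l).toNat = n → cursor = l ^ 2 - m ^ 2 →
    pvBLoop lmax_obs l cursor blocks =
      (PySem.List.pyRange l (lmax_obs + 1) 1).foldl
        (fun bs x => bs ++ [PySem.List.pyRange (x ^ 2 - m ^ 2) ((x + 1) ^ 2 - m ^ 2) 1]) blocks := by
  intro n
  induction n with
  | zero =>
    intro l cursor blocks hn hc
    have hle : lmax_obs + 1 ≤ l := by omega
    rw [pvBLoop, PySem.List.pyRange_one_eq_nil hle]
    simp [show ¬ l ≤ lmax_obs by omega]
  | succ k ih =>
    intro l cursor blocks hn hc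
    subst hc
    have hlt : l < lmax_obs + 1 := by omega
    rw [pvBLoop, PySem.List.pyRange_one_cons hlt, if_pos (show l ≤ lmax_obs by omega),
        List.foldl_cons]
    have hb : l ^ 2 - m ^ 2 + (2 * l + 1) = (l + 1) ^ 2 - m ^ 2 := by ring
    rw [hb]
    exact ih (l + 1) _ _ (by omega) (by ring)

-- ===== VERDICT (by name: the statement is the Claim_ definition above) =====
theorem get_spherical_harmonic_degree_blocks_spec : Claim_equal_get_spherical_harmonic_degree_blocks := by
  intro lmax_obs min_degree _
  unfold Spec_get_spherical_harmonic_degree_blocks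
  unfold get_spherical_harmonic_degree_blocks get_spherical_harmonic_degree_blocks_alt
  rw [pvBLoop_eq lmax_obs min_degree (lmax_obs + 1 - min_degree).toNat min_degree 0 [] rfl (by ring)]
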